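-- pv_equiv track=rewrite | github.com/zliu53468-ai/DG-TOP | app.py | get_streak_length
-- ===== SOURCE A (Python) =====
-- def get_streak_length(history_slice):
--     """計算當前連勝長度。"""
--     if not history_slice:
--         return 0
--
--     current = history_slice[-1]
--     if current not in ['B', 'P']:
--         return 0
--
--     streak = 1
--     for i in range(2, len(history_slice) + 1):
--         if history_slice[-i] == current:
--             streak += 1
--         else:
--             break
--     return streak
-- ===== SOURCE B (Python) =====
-- def get_streak_length(history_slice):
--     """計算當前連勝長度。"""
--     if not history_slice:
--         return 0
--     streak = 0
--     prev = None
--     for x in history_slice: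
--         streak = streak + 1 if x == prev else 1
--         prev = x
--     return streak if prev in ('B', 'P') else 0
-- ===== Notes on version B (the rewrite author's own statement) =====
-- stated objective: alternative
-- what changed: Replaces A's backward scan with negative indexing and early break by a single forward pass maintaining a resetting run counter; the trailing-run length falls out of the final loop state.
import Mathlib
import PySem

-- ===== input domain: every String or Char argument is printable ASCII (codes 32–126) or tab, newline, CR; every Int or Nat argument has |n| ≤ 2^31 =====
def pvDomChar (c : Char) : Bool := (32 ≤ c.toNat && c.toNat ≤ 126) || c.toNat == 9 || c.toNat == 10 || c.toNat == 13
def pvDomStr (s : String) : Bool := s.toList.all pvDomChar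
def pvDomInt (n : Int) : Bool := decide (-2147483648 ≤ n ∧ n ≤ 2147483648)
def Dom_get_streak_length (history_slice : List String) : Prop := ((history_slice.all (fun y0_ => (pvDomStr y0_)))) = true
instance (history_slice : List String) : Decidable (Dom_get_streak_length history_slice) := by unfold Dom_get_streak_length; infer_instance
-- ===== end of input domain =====

-- B is an alternative decomposition: a single forward pass with a resetting run counter, instead of A's backward scan with negative indices and early break.

-- ===== PORT A =====
-- the 'for i in range(2, len+1): … else: break' loop, as structural recursion over the index list
def pvALoop (hs : List String) (current : String) : List Int → Int → Int
  | [], streak => streak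
  | i :: rest, streak =>
    match PySem.List.pyGet? hs (-i) with
    | some v => if v = current then pvALoop hs current rest (streak + 1) else streak
    | none => streak   -- unreachable: 2 ≤ i ≤ len, so hs[-i] is always in range

def get_streak_length (history_slice : List String) : Int :=
  if history_slice = [] then 0
  else
    let current := (PySem.List.pyGet? history_slice (-1)).getD ""
    if current ≠ "B" ∧ current ≠ "P" then 0
    else pvALoop history_slice current
      (PySem.List.pyRange 2 ((history_slice.length : Int) + 1) 1) 1

-- ===== PORT B =====
def get_streak_length_alt (history_slice : List String) : Int :=
  match history_slice with
  | [] => 0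
  | _ =>
    let st := history_slice.foldl
      (fun (p : Int × Option String) x => (if some x = p.2 then p.1 + 1 else 1, some x))
      (0, none)
    if st.2 = some "B" ∨ st.2 = some "P" then st.1 else 0

-- ===== PRECONDITION & SPEC =====
def Spec_get_streak_length (history_slice : List String) (out : Int) : Prop := out = get_streak_length_alt history_slice
instance (history_slice : List String) (out : Int) : Decidable (Spec_get_streak_length history_slice out) := by unfold Spec_get_streak_length; infer_instance

-- ===== CLAIM (what is proved, stated in full; the proofs are below) =====
def Claim_equal_get_streak_length : Prop := ∀ (history_slice : List String), Dom_get_streak_length history_slice → Spec_get_streak_length history_slice (get_streak_length history_slice)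

-- ===== LEMMAS AND PROOFS =====

-- count of leading elements of a list equal to c
def pvCW (c : String) : List String → Int
  | [] => 0
  | y :: t => if y = c then 1 + pvCW c t else 0

-- length of the leading run of a list
def pvLead : List String → Int
  | [] => 0
  | x :: t => 1 + pvCW x t

theorem pvB_foldr_spec (rev : List String) (h : rev ≠ []) :
    rev.foldr (fun x (p : Int × Option String) => (if some x = p.2 then p.1 + 1 else 1, some x))
      (0, none)
      = (pvLead rev, rev.head?) := by
  induction rev with
  | nil => cases h rfl
  | cons x t ih =>
    cases t with
    | nil => simp [pvLead, pvCW]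
    | cons y t' =>
      rw [List.foldr_cons, ih (by simp)]
      by_cases hxy : x = y
      · subst hxy
        simp [pvLead, pvCW]
        ring
      · simp [pvLead, pvCW, hxy, Ne.symm hxy]

theorem pvB_foldl_spec (hs : List String) (h : hs ≠ []) :
    hs.foldl (fun (p : Int × Option String) x => (if some x = p.2 then p.1 + 1 else 1, some x))
      (0, none)
      = (pvLead hs.reverse, hs.reverse.head?) := by
  have := pvB_foldr_spec hs.reverse (by simpa using h)
  rw [← List.foldl_reverse] at this
  simpa using this

theorem pvNegGet (hs : List String) (d : ℕ) (hd : d + 1 < hs.length) :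
    PySem.List.pyGet? hs (-((d : Int) + 2)) = hs.reverse[d + 1]? := by
  have h2 : ((d : Int) + 2) = ((d + 2 : ℕ) : Int) := by push_cast; ring
  rw [h2, PySem.List.pyGet?_neg_natCast hs (d + 2) (by omega) (by omega)]
  rw [List.getElem?_reverse (by omega)]
  congr 1
  omega

theorem pvALoop_spec (hs : List String) (c : String) :
    ∀ (t : List String) (d : ℕ) (streak : Int),
      hs.reverse.drop (1 + d) = t →
      pvALoop hs c (PySem.List.pyRange (2 + (d : Int)) ((hs.length : Int) + 1) 1) streak
        = streak + pvCW c t := by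
  intro t
  induction t with
  | nil =>
    intro d streak hdrop
    have hlen : hs.length ≤ 1 + d := by
      have := congrArg List.length hdrop
      simp at this
      omega
    rw [PySem.List.pyRange_one_eq_nil (by omega)]
    simp [pvALoop, pvCW]
  | cons y t' ih =>
    intro d streak hdrop
    have hlt : 1 + d < hs.length := by
      have := congrArg List.length hdrop
      simp at this
      omega
    have hget : hs.reverse[d + 1]? = some y := by
      have h0 : (hs.reverse.drop (1 + d))[0]? = some y := by rw [hdrop]; rfl
      rw [List.getElem?_drop] at h0
      simpa [show 1 + d + 0 = d + 1 by omega] using h0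
    have hdrop' : hs.reverse.drop (1 + (d + 1)) = t' := by
      have : hs.reverse.drop (1 + d + 1) = (hs.reverse.drop (1 + d)).drop 1 := by
        rw [List.drop_drop]
      rw [hdrop] at this
      simpa [show 1 + (d + 1) = 1 + d + 1 by omega] using this
    rw [PySem.List.pyRange_one_cons (by omega)]
    show (match PySem.List.pyGet? hs (-(2 + (d : Int))) with
      | some v => if v = c then pvALoop hs c (PySem.List.pyRange (2 + (d : Int) + 1) ((hs.length : Int) + 1) 1) (streak + 1) else streak
      | none => streak) = streak + pvCW c (y :: t')
    have hneg : (-(2 + (d : Int))) = (-((d : Int) + 2)) := by ring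
    rw [hneg, pvNegGet hs d (by omega), hget]
    by_cases hyc : y = c
    · subst hyc
      have harg : (2 + (d : Int) + 1) = 2 + ((d + 1 : ℕ) : Int) := by push_cast; ring
      rw [harg, ih (d + 1) (streak + 1) hdrop']
      simp [pvCW]
      ring
    · simp [pvCW, hyc]

-- ===== VERDICT (by name: the statement is the Claim_ definition above) =====
theorem get_streak_length_spec : Claim_equal_get_streak_length := by
  intro hs _
  unfold Spec_get_streak_length
  cases hhs : hs with
  | nil => simp [get_streak_length, get_streak_length_alt]
  | cons h0 t0 =>
    rw [← hhs]
    have hne : hs ≠ [] := by rw [hhs]; simp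
    obtain ⟨c, rest, hrev⟩ : ∃ c rest, hs.reverse = c :: rest := by
      rcases hr : hs.reverse with _ | ⟨c, rest⟩
      · exact absurd (by simpa using congrArg List.reverse hr) hne
      · exact ⟨c, rest, rfl⟩
    have hlast : PySem.List.pyGet? hs (-1) = some c := by
      rw [PySem.List.pyGet?_neg_one, ← List.head?_reverse, hrev]
      rfl
    have halt : get_streak_length_alt hs
        = if c = "B" ∨ c = "P" then pvLead hs.reverse else 0 := by
      unfold get_streak_length_alt
      rw [hhs]
      rw [← hhs, pvB_foldl_spec hs hne]
      simp [hrev]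
    unfold get_streak_length
    rw [if_neg hne, hlast]
    by_cases hbp : c = "B" ∨ c = "P"
    · rw [if_neg (by tauto)]
      simp only [Option.getD_some]
      have := pvALoop_spec hs c rest 0 1 (by rw [hrev]; simp)
      simp only [Nat.cast_zero, add_zero] at this
      rw [this, halt, if_pos hbp, hrev]
      simp [pvLead]
    · rw [if_pos (by tauto), halt, if_neg (by tauto)]
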